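-- pv_equiv track=rewrite | github.com/rttgnck/nasOS | backend/app/services/share_service.py | _remove_section_from_text
-- ===== SOURCE A (Python) =====
-- def _remove_section_from_text(text: str, section_name: str) -> str:
--     """Remove a named [section] from smb.conf text content."""
--     lines = text.splitlines(keepends=True)
--     new_lines: list[str] = []
--     skip = False
--     for line in lines:
--         stripped = line.strip().lower()
--         if stripped == f"[{section_name.lower()}]":
--             skip = True
--             continue
--         if skip and line.strip().startswith("["):
--             skip = False
--         if not skip:
--             new_lines.append(line)
--     return "".join(new_lines)
-- ===== SOURCE B (Python) =====
-- def _remove_section_from_text(text: str, section_name: str) -> str: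
--     """Remove a named [section] from smb.conf text content (block-partition decomposition)."""
--     target = f"[{section_name.lower()}]"
--     blocks = []
--     cur = []
--     for line in text.splitlines(keepends=True):
--         if line.strip().startswith("["):
--             blocks.append(cur)
--             cur = [line]
--         else:
--             cur.append(line)
--     blocks.append(cur)
--     kept = [b for b in blocks if not b or b[0].strip().lower() != target]
--     return "".join(line for b in kept for line in b)
-- ===== Notes on version B (the rewrite author's own statement) =====
-- stated objective: alternative
-- what changed: A scans lines with a mutable skip flag deciding line by line; B partitions the lines into header-delimited blocks and drops whole blocks whose header equals the target section header.
import Mathlib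
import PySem

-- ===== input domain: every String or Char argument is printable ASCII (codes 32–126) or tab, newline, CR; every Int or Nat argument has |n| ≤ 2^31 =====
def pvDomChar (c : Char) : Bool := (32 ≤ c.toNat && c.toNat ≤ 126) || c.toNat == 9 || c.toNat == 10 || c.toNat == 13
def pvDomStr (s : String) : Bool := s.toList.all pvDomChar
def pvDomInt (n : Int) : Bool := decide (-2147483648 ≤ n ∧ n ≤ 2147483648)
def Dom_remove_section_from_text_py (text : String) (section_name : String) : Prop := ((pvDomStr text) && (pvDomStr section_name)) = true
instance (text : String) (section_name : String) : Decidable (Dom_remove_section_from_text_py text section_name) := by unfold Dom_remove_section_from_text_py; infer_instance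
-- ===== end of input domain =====

-- B replaces A's skip-flag line scan by a block-partition decomposition (split into [section] blocks, drop the matching ones); same linear cost.


-- shared primitive used by BOTH Pythons: str.splitlines(keepends=True).
-- Exact on the Dom alphabet, where the only line-break characters are '\n', '\r' and the pair "\r\n".
def splitlinesKeepAux (cur : List Char) : List Char → List (List Char)
  | [] => if cur = [] then [] else [cur.reverse]
  | '\r' :: '\n' :: rest => (cur.reverse ++ ['\r', '\n']) :: splitlinesKeepAux [] rest
  | '\n' :: rest => (cur.reverse ++ ['\n']) :: splitlinesKeepAux [] rest
  | '\r' :: rest => (cur.reverse ++ ['\r']) :: splitlinesKeepAux [] rest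
  | c :: rest => splitlinesKeepAux (c :: cur) rest

def splitlinesKeep (cs : List Char) : List (List Char) := splitlinesKeepAux [] cs

-- ===== PORT A =====
-- one iteration of A's loop: state = (new_lines, skip)
def stepA (target : List Char) (st : List (List Char) × Bool) (line : List Char) :
    List (List Char) × Bool :=
  let stripped := PySem.Chars.lower (PySem.Chars.strip line)
  if stripped = target then (st.1, true)
  else
    let skip := if st.2 && PySem.Chars.startswith (PySem.Chars.strip line) ['['] then false else st.2
    if skip then (st.1, skip) else (st.1 ++ [line], skip)

def remove_section_from_text_py (text : String) (section_name : String) : String :=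
  let lines := splitlinesKeep text.toList
  let target := '[' :: (PySem.Chars.lower section_name.toList ++ [']'])
  let res := lines.foldl (stepA target) ([], false)
  String.mk (PySem.Chars.join [] res.1)

-- ===== PORT B =====
-- keep a block unless its header line is the target section header
def keepBlock (target : List Char) (b : List (List Char)) : Bool :=
  match b with
  | [] => true
  | h :: _ => !(PySem.Chars.lower (PySem.Chars.strip h) == target)

-- one iteration of B's partition loop: state = (blocks, cur)
def stepB (st : List (List (List Char)) × List (List Char)) (line : List Char) :
    List (List (List Char)) × List (List Char) :=
  if PySem.Chars.startswith (PySem.Chars.strip line) ['['] then (st.1 ++ [st.2], [line])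
  else (st.1, st.2 ++ [line])

def remove_section_from_text_py_alt (text : String) (section_name : String) : String :=
  let target := '[' :: (PySem.Chars.lower section_name.toList ++ [']'])
  let st := (splitlinesKeep text.toList).foldl stepB ([], [])
  let blocks := st.1 ++ [st.2]
  let kept := blocks.filter (keepBlock target)
  String.mk (PySem.Chars.join [] kept.flatten)

-- ===== PRECONDITION & SPEC =====
def Spec_remove_section_from_text_py (text : String) (section_name : String) (out : String) : Prop := out = remove_section_from_text_py_alt text section_name
instance (text : String) (section_name : String) (out : String) : Decidable (Spec_remove_section_from_text_py text section_name out) := by unfold Spec_remove_section_from_text_py; infer_instance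

-- ===== CLAIM (what is proved, stated in full; the proofs are below) =====
def Claim_equal_remove_section_from_text_py : Prop := ∀ (text : String) (section_name : String), Dom_remove_section_from_text_py text section_name → Spec_remove_section_from_text_py text section_name (remove_section_from_text_py text section_name)

-- ===== LEMMAS AND PROOFS =====

-- a line whose lowered strip is the target '['-headed string does start (unlowered) with '['
lemma char_toNat_ofNat (n : Nat) (h : n < 55296) : (Char.ofNat n).toNat = n := by
  unfold Char.ofNat
  rw [dif_pos (Or.inl h)]
  show (UInt32.ofNatLT n _).toNat = n
  simp

lemma lowerChar_eq_lbrack {c : Char} (h : PySem.Chars.lowerChar c = '[') : c = '[' := by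
  unfold PySem.Chars.lowerChar at h
  split at h
  · rename_i hu
    exfalso
    simp only [PySem.Chars.isupper, Bool.and_eq_true, decide_eq_true_eq, Char.le_def,
      UInt32.le_iff_toNat_le] at hu
    have hA : ('A').val.toNat = 65 := by decide
    have hZ : ('Z').val.toNat = 90 := by decide
    have hv : c.toNat = c.val.toNat := rfl
    have h2 := congrArg Char.toNat h
    rw [char_toNat_ofNat _ (by omega)] at h2
    have hlb : ('[').toNat = 91 := by decide
    omega
  · exact h

lemma tgt_isHdr {l t : List Char}
    (h : PySem.Chars.lower (PySem.Chars.strip l) = '[' :: t) :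
    PySem.Chars.startswith (PySem.Chars.strip l) ['['] = true := by
  rcases hs : PySem.Chars.strip l with _ | ⟨c, r⟩
  · rw [hs] at h; simp [PySem.Chars.lower] at h
  · rw [hs] at h
    simp only [PySem.Chars.lower, List.map_cons, List.cons.injEq] at h
    have hc : c = '[' := lowerChar_eq_lbrack h.1
    subst hc
    rw [PySem.Chars.startswith_iff]
    exact ⟨r, rfl⟩

-- the main invariant: A's skip-scan output equals B's kept-blocks output
lemma fold_eq (t : List Char) :
    ∀ (lines : List (List Char)) (blocks : List (List (List Char)))
      (cur nl : List (List Char)),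
      nl = (blocks.filter (keepBlock ('[' :: t))).flatten ++
            (if keepBlock ('[' :: t) cur then cur else []) →
      (lines.foldl (stepA ('[' :: t)) (nl, !keepBlock ('[' :: t) cur)).1 =
        ((((lines.foldl stepB (blocks, cur)).1 ++ [(lines.foldl stepB (blocks, cur)).2]).filter
            (keepBlock ('[' :: t))).flatten) := by
  intro lines
  induction lines with
  | nil =>
      intro blocks cur nl hnl
      simp only [List.foldl_nil, List.filter_append, List.flatten_append]
      rw [hnl]
      cases hk : keepBlock ('[' :: t) cur <;> simp [hk]
  | cons l ls ih =>
      intro blocks cur nl hnl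
      simp only [List.foldl_cons]
      by_cases hT : PySem.Chars.lower (PySem.Chars.strip l) = '[' :: t
      · -- target header line: A sets skip, B starts a dropped block
        have hH := tgt_isHdr hT
        have hA : stepA ('[' :: t) (nl, !keepBlock ('[' :: t) cur) l = (nl, true) := by
          simp [stepA, hT]
        have hB : stepB (blocks, cur) l = (blocks ++ [cur], [l]) := by
          simp [stepB, hH]
        rw [hA, hB]
        have hk : keepBlock ('[' :: t) [l] = false := by
          simp [keepBlock, hT]
        have := ih (blocks ++ [cur]) [l] nl ?_
        · rw [hk] at this; simpa using this
        · rw [hnl, hk]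
          cases hkc : keepBlock ('[' :: t) cur <;> simp [hkc, List.filter_append]
      · by_cases hH : PySem.Chars.startswith (PySem.Chars.strip l) ['['] = true
        · -- non-target header: A resets skip and keeps the line, B starts a kept block
          have hA : stepA ('[' :: t) (nl, !keepBlock ('[' :: t) cur) l = (nl ++ [l], false) := by
            cases hkc : keepBlock ('[' :: t) cur <;> simp [stepA, hT, hH, hkc]
          have hB : stepB (blocks, cur) l = (blocks ++ [cur], [l]) := by
            simp [stepB, hH]
          rw [hA, hB]
          have hk : keepBlock ('[' :: t) [l] = true := by
            simp [keepBlock, hT]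
          have := ih (blocks ++ [cur]) [l] (nl ++ [l]) ?_
          · rw [hk] at this; simpa using this
          · rw [hnl, hk]
            cases hkc : keepBlock ('[' :: t) cur <;> simp [hkc, List.filter_append]
        · -- ordinary line: it joins the current block
          have hTgt : keepBlock ('[' :: t) (cur ++ [l]) = keepBlock ('[' :: t) cur := by
            cases cur with
            | nil =>
                simp only [List.nil_append, keepBlock]
                simp only [Bool.not_eq_true', beq_eq_false_iff_ne, ne_eq]
                intro hc; exact hH (tgt_isHdr hc)
            | cons h r => simp [keepBlock]
          have hB : stepB (blocks, cur) l = (blocks, cur ++ [l]) := by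
            simp [stepB, hH]
          rw [hB]
          cases hkc : keepBlock ('[' :: t) cur with
          | false =>
              have hA : stepA ('[' :: t) (nl, !false) l = (nl, true) := by
                simp [stepA, hT, hH]
              rw [hA]
              have := ih blocks (cur ++ [l]) nl ?_
              · rw [hTgt, hkc] at this; simpa [hkc] using this
              · rw [hnl, hTgt, hkc]; simp
          | true =>
              have hA : stepA ('[' :: t) (nl, !true) l = (nl ++ [l], false) := by
                simp [stepA, hT, hH]
              rw [hA]
              have := ih blocks (cur ++ [l]) (nl ++ [l]) ?_
              · rw [hTgt, hkc] at this; simpa [hkc] using this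
              · rw [hnl, hTgt, hkc]; simp

-- ===== VERDICT (by name: the statement is the Claim_ definition above) =====
theorem remove_section_from_text_py_spec : Claim_equal_remove_section_from_text_py := by
  intro text section_name _
  unfold Spec_remove_section_from_text_py
  unfold remove_section_from_text_py remove_section_from_text_py_alt
  exact congrArg (fun x => String.mk (PySem.Chars.join [] x))
    (fold_eq (PySem.Chars.lower section_name.toList ++ [']'])
      (splitlinesKeep text.toList) [] [] [] (by simp [keepBlock]))
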